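-- pv_equiv track=rewrite | github.com/Wayne280/Ujian_UraiRajutKata | coretan1.py | urai
-- ===== SOURCE A (Python) =====
-- def urai(y):
--     z = ''
--     y = y.replace(' ','')
--
--     #panjang kata
--     length= len(y)
--
--     i =0
--
--     for j in range(length):
--         for k in range(j+1):
--             z+= y[k]
--     return z
-- ===== SOURCE B (Python) =====
-- def urai(y):
--     y = y.replace(' ', '')
--     p = ''
--     parts = []
--     for ch in y:
--         p += ch
--         parts.append(p)
--     return ''.join(parts)
-- ===== Notes on version B (the rewrite author's own statement) =====
-- stated objective: faster
-- what changed: Replaces the nested prefix-rebuilding loops (re-indexing y[k] for every j) with a single pass that maintains the running prefix as accumulated state and joins the collected prefixes once.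
import Mathlib
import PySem

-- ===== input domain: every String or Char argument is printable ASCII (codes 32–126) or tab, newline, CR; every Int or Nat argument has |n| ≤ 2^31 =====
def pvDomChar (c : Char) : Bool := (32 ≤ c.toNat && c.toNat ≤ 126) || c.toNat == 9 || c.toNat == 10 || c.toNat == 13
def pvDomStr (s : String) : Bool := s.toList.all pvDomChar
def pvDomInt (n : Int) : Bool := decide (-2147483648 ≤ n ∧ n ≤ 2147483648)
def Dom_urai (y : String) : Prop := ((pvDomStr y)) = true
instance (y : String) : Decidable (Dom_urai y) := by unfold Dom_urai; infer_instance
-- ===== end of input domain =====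

-- B replaces A's nested prefix-rebuilding loops with one pass maintaining the running prefix
-- as accumulated state, joining the collected prefixes once (objective: faster, constant-factor).

-- ===== PORT A =====
-- for j in range(length): for k in range(j+1): z += y[k]   (k always in range, so pyGetD's default is never used)
def urai (y : String) : String :=
  let y' := PySem.Str.replace y " " ""
  let cs := y'.toList
  let length : Int := PySem.Str.len y'
  let z : List Char :=
    (PySem.List.pyRange 0 length 1).foldl (fun z j =>
      (PySem.List.pyRange 0 (j + 1) 1).foldl (fun z k =>
        z ++ [PySem.List.pyGetD cs k ' ']) z) []
  String.ofList z

-- ===== PORT B =====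
-- single pass: p += ch; parts.append(p); return ''.join(parts)
def urai_alt (y : String) : String :=
  let cs := (PySem.Str.replace y " " "").toList
  let st := cs.foldl (fun (st : List Char × List (List Char)) ch =>
      (st.1 ++ [ch], st.2 ++ [st.1 ++ [ch]])) ([], [])
  String.ofList (PySem.Chars.join [] st.2)

-- ===== PRECONDITION & SPEC =====
def Spec_urai (y : String) (out : String) : Prop := out = urai_alt y
instance (y : String) (out : String) : Decidable (Spec_urai y out) := by unfold Spec_urai; infer_instance

-- ===== CLAIM (what is proved, stated in full; the proofs are below) =====
def Claim_equal_urai : Prop := ∀ (y : String), Dom_urai y → Spec_urai y (urai y)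

-- ===== LEMMAS AND PROOFS =====

-- the list of successive prefixes of l, each extended on the left by p
def pvPrefs : List Char → List Char → List (List Char)
  | _, [] => []
  | p, c :: t => (p ++ [c]) :: pvPrefs (p ++ [c]) t

-- A's inner loop appends the first n characters of cs
theorem pv_inner (cs : List Char) (z : List Char) (n : Nat) (hn : n ≤ cs.length) :
    (PySem.List.pyRange 0 (n : Int) 1).foldl (fun z k =>
      z ++ [PySem.List.pyGetD cs k ' ']) z = z ++ cs.take n := by
  induction n generalizing z with
  | zero => simp
  | succ m ih =>
    have hm : m < cs.length := hn
    rw [show ((m + 1 : Nat) : Int) = (m : Int) + 1 by push_cast; ring,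
        PySem.List.pyRange_one_succ_right (by positivity), List.foldl_append,
        ih z (Nat.le_of_lt hm)]
    simp only [List.foldl_cons, List.foldl_nil, PySem.List.pyGetD_natCast]
    rw [List.take_add_one, List.getElem?_eq_getElem hm]
    simp [List.getD_eq_getElem?_getD, List.getElem?_eq_getElem hm]

-- A's outer loop collects the prefixes of lengths 1..n
theorem pv_outer (cs : List Char) (z : List Char) (n : Nat) (hn : n ≤ cs.length) :
    (PySem.List.pyRange 0 (n : Int) 1).foldl (fun z j =>
      (PySem.List.pyRange 0 (j + 1) 1).foldl (fun z k =>
        z ++ [PySem.List.pyGetD cs k ' ']) z) z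
    = z ++ ((List.range n).map (fun j => cs.take (j + 1))).flatten := by
  induction n generalizing z with
  | zero => simp
  | succ m ih =>
    rw [show ((m + 1 : Nat) : Int) = (m : Int) + 1 by push_cast; ring,
        PySem.List.pyRange_one_succ_right (by positivity), List.foldl_append,
        ih z (Nat.le_of_succ_le hn)]
    simp only [List.foldl_cons, List.foldl_nil]
    rw [show ((m : Int) + 1) = ((m + 1 : Nat) : Int) by push_cast; ring,
        pv_inner cs _ (m + 1) hn, List.range_succ]
    simp

-- B's fold computes (p ++ l, out ++ pvPrefs p l)
theorem pv_fold (l : List Char) (p : List Char) (out : List (List Char)) :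
    l.foldl (fun (st : List Char × List (List Char)) ch =>
      (st.1 ++ [ch], st.2 ++ [st.1 ++ [ch]])) (p, out)
    = (p ++ l, out ++ pvPrefs p l) := by
  induction l generalizing p out with
  | nil => simp [pvPrefs]
  | cons c t ih => simp [pvPrefs, ih]

-- joining with the empty separator is flattening
theorem pv_join_nil (parts : List (List Char)) :
    PySem.Chars.join [] parts = parts.flatten := by
  induction parts with
  | nil => simp [PySem.Chars.join_nil]
  | cons a r ih =>
    cases r with
    | nil => simp [PySem.Chars.join_singleton]
    | cons b s => rw [PySem.Chars.join_cons_cons]; simp_all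

-- the flattened prefixes equal A's collected output
theorem pv_prefs_flatten (l : List Char) (p : List Char) :
    (pvPrefs p l).flatten
    = ((List.range l.length).map (fun j => p ++ l.take (j + 1))).flatten := by
  induction l generalizing p with
  | nil => simp [pvPrefs]
  | cons c t ih =>
    simp only [pvPrefs, List.flatten_cons, List.length_cons,
      List.range_succ_eq_map, List.map_cons, List.map_map]
    rw [ih (p ++ [c])]
    simp [Function.comp_def, List.take_succ_cons, List.append_assoc]

-- ===== VERDICT (by name: the statement is the Claim_ definition above) =====
theorem urai_spec : Claim_equal_urai := by
  intro y _
  unfold Spec_urai urai urai_alt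
  simp only [PySem.Str.len_eq]
  rw [pv_outer _ _ _ (le_refl _), pv_fold]
  dsimp only
  rw [pv_join_nil]
  simp only [List.nil_append]
  rw [pv_prefs_flatten]
  simp
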